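-- pv_equiv track=rewrite | github.com/Parasmukati/Opro_DDP | network_opp.py | is_terminals_connected
-- ===== SOURCE A (Python) =====
-- from collections import deque
--
-- def is_terminals_connected(nodes, built_edges_set, failed_edges_set, terminals):
--     # build adjacency for surviving edges
--     adj = {n: [] for n in nodes}
--     for (u,v) in built_edges_set:
--         if (u,v) in failed_edges_set or (v,u) in failed_edges_set:
--             continue
--         adj[u].append(v)
--         adj[v].append(u)
--     # BFS from first terminal and check reachability of all terminals
--     start = terminals[0]
--     seen = {start}
--     dq = deque([start])
--     while dq:
--         cur = dq.popleft()
--         for nb in adj[cur]: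
--             if nb not in seen:
--                 seen.add(nb)
--                 dq.append(nb)
--     return all(t in seen for t in terminals)
-- ===== SOURCE B (Python) =====
-- def is_terminals_connected(nodes, built_edges_set, failed_edges_set, terminals):
--     # Component labels via naive union (merge-by-relabel); no adjacency lists, no BFS queue.
--     comp = {n: n for n in nodes}
--     for (u, v) in built_edges_set:
--         if (u, v) in failed_edges_set or (v, u) in failed_edges_set:
--             continue
--         cu, cv = comp[u], comp[v]
--         if cu != cv:
--             for n in comp:
--                 if comp[n] == cu:
--                     comp[n] = cv
--     root = comp[terminals[0]]
--     return all(t in comp and comp[t] == root for t in terminals)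
-- ===== Notes on version B (the rewrite author's own statement) =====
-- stated objective: alternative
-- what changed: Replaces A's adjacency-dict construction plus BFS with an explicit queue by naive union-by-relabel: a component-label dict over nodes is folded once over the edge list, merging the two labels of each surviving edge, then all terminals are checked for the first terminal's label.
import Mathlib
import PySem

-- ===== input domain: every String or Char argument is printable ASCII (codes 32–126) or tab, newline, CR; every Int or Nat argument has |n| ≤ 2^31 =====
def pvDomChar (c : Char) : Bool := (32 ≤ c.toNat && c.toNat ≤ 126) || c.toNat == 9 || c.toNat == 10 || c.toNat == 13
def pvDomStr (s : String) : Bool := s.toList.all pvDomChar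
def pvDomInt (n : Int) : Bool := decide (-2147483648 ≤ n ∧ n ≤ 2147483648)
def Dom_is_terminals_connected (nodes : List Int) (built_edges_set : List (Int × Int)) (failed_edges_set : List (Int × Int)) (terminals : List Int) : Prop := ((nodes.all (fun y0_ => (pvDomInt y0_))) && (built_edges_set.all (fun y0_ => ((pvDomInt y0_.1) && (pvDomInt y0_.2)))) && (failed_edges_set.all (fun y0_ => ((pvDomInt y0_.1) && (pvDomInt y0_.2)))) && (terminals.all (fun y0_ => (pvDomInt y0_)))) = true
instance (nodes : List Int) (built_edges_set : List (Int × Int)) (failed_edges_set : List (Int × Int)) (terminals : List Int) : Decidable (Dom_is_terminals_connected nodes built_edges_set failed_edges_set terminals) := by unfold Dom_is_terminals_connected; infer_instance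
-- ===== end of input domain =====

-- B replaces A's adjacency-dict + BFS-queue traversal by naive union-by-relabel: a
-- component-label dict merged once per surviving edge (alternative algorithm, similar cost).

-- ===== PORT A =====
-- adj[u].append(v); adj[v].append(u)  (Dict.modify inserts where Python would raise KeyError;
-- those inputs are excluded by Pre_ below, so the port is exact on the admitted domain)
def pvAdjStep (d : PySem.Dict Int (List Int)) (uv : Int × Int) : PySem.Dict Int (List Int) :=
  (d.modify uv.1 [] (fun l => l ++ [uv.2])).modify uv.2 [] (fun l => l ++ [uv.1])

-- the inner 'for nb in adj[cur]' loop: returns (new seen, list of freshly appended nodes)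
def pvScan (seen : PySem.Set Int) (nbs : List Int) : PySem.Set Int × List Int :=
  nbs.foldl (fun st nb => if nb ∈ st.1 then st else (PySem.Set.add st.1 nb, st.2 ++ [nb])) (seen, [])

theorem pvScan_spec_gen (nbs : List Int) : ∀ (seen acc : List Int), ∃ new : List Int,
    nbs.foldl (fun (st : PySem.Set Int × List Int) nb =>
      if nb ∈ st.1 then st else (PySem.Set.add st.1 nb, st.2 ++ [nb])) (seen, acc)
      = (seen ++ new, acc ++ new)
    ∧ (∀ x ∈ new, x ∈ nbs) ∧ (∀ x ∈ new, x ∉ seen) ∧ new.Nodup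
    ∧ (∀ x ∈ nbs, x ∈ seen ∨ x ∈ new) := by
  induction nbs with
  | nil => intro seen acc; exact ⟨[], by simp⟩
  | cons nb nbs ih =>
    intro seen acc
    by_cases h : nb ∈ seen
    · obtain ⟨new, heq, h1, h2, h3, h4⟩ := ih seen acc
      refine ⟨new, ?_, ?_, h2, h3, ?_⟩
      · simpa [h] using heq
      · intro x hx; exact List.mem_cons_of_mem _ (h1 x hx)
      · intro x hx
        rcases List.mem_cons.1 hx with rfl | hx
        · exact Or.inl h
        · exact h4 x hx
    · have hadd : PySem.Set.add seen nb = seen ++ [nb] := by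
        simp only [PySem.Set.add]
        rw [if_neg]
        simp only [PySem.Set.contains_iff]
        exact h
      obtain ⟨new, heq, h1, h2, h3, h4⟩ := ih (seen ++ [nb]) (acc ++ [nb])
      refine ⟨nb :: new, ?_, ?_, ?_, ?_, ?_⟩
      · simp only [List.foldl_cons, if_neg h, hadd]
        rw [heq]; simp
      · intro x hx
        rcases List.mem_cons.1 hx with rfl | hx
        · exact List.mem_cons_self
        · exact List.mem_cons_of_mem _ (h1 x hx)
      · intro x hx
        rcases List.mem_cons.1 hx with rfl | hx
        · exact h
        · intro hs; exact h2 x hx (by simp [hs])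
      · refine List.nodup_cons.2 ⟨fun hmem => ?_, h3⟩
        exact h2 nb hmem (by simp)
      · intro x hx
        rcases List.mem_cons.1 hx with rfl | hx
        · exact Or.inr List.mem_cons_self
        · rcases h4 x hx with hs | hn
          · rcases List.mem_append.1 hs with hs | hs
            · exact Or.inl hs
            · simp at hs; subst hs; exact Or.inr List.mem_cons_self
          · exact Or.inr (List.mem_cons_of_mem _ hn)

theorem pvScan_spec (seen : PySem.Set Int) (nbs : List Int) : ∃ new : List Int,
    pvScan seen nbs = (seen ++ new, new)
    ∧ (∀ x ∈ new, x ∈ nbs) ∧ (∀ x ∈ new, x ∉ seen) ∧ new.Nodup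
    ∧ (∀ x ∈ nbs, x ∈ seen ∨ x ∈ new) := by
  obtain ⟨new, heq, h⟩ := pvScan_spec_gen nbs seen []
  exact ⟨new, by simpa [pvScan] using heq, h⟩

theorem pv_mem_getD_flatten (d : PySem.Dict Int (List Int)) (k x : Int)
    (hx : x ∈ d.getD k []) : x ∈ d.values.flatten := by
  rcases h : d.get? k with _ | v
  · rw [PySem.Dict.getD_of_get?_eq_none d [] h] at hx; simp at hx
  · rw [PySem.Dict.getD_of_get?_eq_some d [] h] at hx
    have hv : (k, v) ∈ d.items := PySem.Dict.mem_items_of_get?_eq_some d h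
    exact List.mem_flatten.2 ⟨v, List.mem_map.2 ⟨(k, v), hv, rfl⟩, hx⟩

theorem pv_filter_measure (V seen new : List Int) (hnd : new.Nodup)
    (hsub : ∀ x ∈ new, x ∈ V) (hf : ∀ x ∈ new, x ∉ seen) :
    (V.filter (fun x => !(decide (x ∈ seen ++ new)))).length + new.length
      ≤ (V.filter (fun x => !(decide (x ∈ seen)))).length := by
  classical
  set W := V.filter (fun x => !(decide (x ∈ seen))) with hW
  have hsplit : (V.filter (fun x => !(decide (x ∈ seen ++ new))))
      = W.filter (fun x => !(decide (x ∈ new))) := by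
    rw [hW, List.filter_filter]
    apply List.filter_congr
    intro x _
    by_cases h1 : x ∈ seen <;> by_cases h2 : x ∈ new <;> simp [h1, h2]
  rw [hsplit]
  have hsp : new.Subperm W := by
    refine List.subperm_of_subset hnd ?_
    intro x hx
    rw [hW, List.mem_filter]
    exact ⟨hsub x hx, by simp [hf x hx]⟩
  have hcount : new.length ≤ W.countP (fun x => decide (x ∈ new)) := by
    have h1 := hsp.countP_le (fun x => decide (x ∈ new))
    have hall : new.countP (fun x => decide (x ∈ new)) = new.length :=
      List.countP_eq_length.2 (fun x hx => by simpa using hx)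
    omega
  have hlen := List.length_eq_countP_add_countP (p := fun x => decide (x ∈ new)) (l := W)
  have hfil : W.countP (fun a => decide ¬(decide (a ∈ new) = true))
      = (W.filter (fun x => !(decide (x ∈ new)))).length := by
    rw [List.countP_eq_length_filter]
    congr 1
    apply List.filter_congr
    intro x _
    by_cases h : x ∈ new <;> simp [h]
  omega

def pvBFS (adj : PySem.Dict Int (List Int)) (dq : List Int) (seen : PySem.Set Int) :
    PySem.Set Int :=
  match dq with
  | [] => seen
  | cur :: rest =>
    let p := pvScan seen (adj.getD cur [])
    pvBFS adj (rest ++ p.2) p.1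
termination_by (adj.values.flatten.filter (fun x => !(decide (x ∈ seen)))).length + dq.length
decreasing_by
  obtain ⟨new, hp, h1, h2, h3, _⟩ := pvScan_spec seen (adj.getD cur [])
  simp only [hp]
  have := pv_filter_measure (adj.values.flatten) seen new h3
    (fun x hx => pv_mem_getD_flatten adj cur x (h1 x hx)) h2
  simp only [List.length_append, List.length_cons]
  omega

def is_terminals_connected (nodes : List Int) (built_edges_set : List (Int × Int))
    (failed_edges_set : List (Int × Int)) (terminals : List Int) : Bool :=
  let adj := built_edges_set.foldl
    (fun d uv =>
      if failed_edges_set.contains uv || failed_edges_set.contains (uv.2, uv.1) then d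
      else pvAdjStep d uv)
    (nodes.foldl (fun d n => d.insert n ([] : List Int)) PySem.Dict.empty)
  match terminals with
  | [] => false  -- Python raises IndexError at terminals[0]; excluded by Pre_
  | start :: _ =>
    let seen := pvBFS adj [start] (PySem.Set.ofList [start])
    terminals.all (fun t => PySem.Set.contains seen t)

-- ===== PORT B =====
-- 'for n in comp: if comp[n] == cu: comp[n] = cv'  (keys are read in insertion order and
-- only values change, so iterating comp.keys is exact; every key read is present)
def pvMerge (comp : PySem.Dict Int Int) (cu cv : Int) : PySem.Dict Int Int :=
  comp.keys.foldl (fun d n => if d.getD n 0 == cu then d.insert n cv else d) comp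

def is_terminals_connected_alt (nodes : List Int) (built_edges_set : List (Int × Int))
    (failed_edges_set : List (Int × Int)) (terminals : List Int) : Bool :=
  -- 'comp[u]' / 'comp[v]' / 'comp[terminals[0]]' raise KeyError on a missing key in Python;
  -- Dict.getD 0 is exact on present keys, and missing keys occur only outside Pre_
  let comp := built_edges_set.foldl
    (fun comp uv =>
      if failed_edges_set.contains uv || failed_edges_set.contains (uv.2, uv.1) then comp
      else
        let cu := comp.getD uv.1 0
        let cv := comp.getD uv.2 0
        if cu ≠ cv then pvMerge comp cu cv else comp)
    (nodes.foldl (fun d n => d.insert n n) PySem.Dict.empty)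
  match terminals with
  | [] => false  -- Python raises IndexError at terminals[0]; excluded by Pre_
  | t0 :: _ =>
    let root := comp.getD t0 0
    terminals.all (fun t => comp.contains t && (comp.getD t 0 == root))

-- ===== PRECONDITION & SPEC =====
-- Pre_ excludes exactly the inputs on which A raises: empty terminals (IndexError at
-- terminals[0]), a first terminal absent from nodes (KeyError at adj[start]), or a surviving
-- edge with an endpoint absent from nodes (KeyError at adj[u].append / adj[v].append).
def Pre_is_terminals_connected (nodes : List Int) (built_edges_set : List (Int × Int)) (failed_edges_set : List (Int × Int)) (terminals : List Int) : Prop :=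
  terminals ≠ [] ∧ terminals.headI ∈ nodes ∧
  ∀ uv ∈ built_edges_set, (uv ∉ failed_edges_set ∧ (uv.2, uv.1) ∉ failed_edges_set) →
    uv.1 ∈ nodes ∧ uv.2 ∈ nodes
instance (nodes : List Int) (built_edges_set : List (Int × Int)) (failed_edges_set : List (Int × Int)) (terminals : List Int) : Decidable (Pre_is_terminals_connected nodes built_edges_set failed_edges_set terminals) := by unfold Pre_is_terminals_connected; infer_instance

def pvWitness_is_terminals_connected : List Int × (List (Int × Int)) × (List (Int × Int)) × List Int :=
  ([1, 2, 3], [(1, 2), (2, 3)], [(2, 3)], [1, 2])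

def Spec_is_terminals_connected (nodes : List Int) (built_edges_set : List (Int × Int)) (failed_edges_set : List (Int × Int)) (terminals : List Int) (out : Bool) : Prop := out = is_terminals_connected_alt nodes built_edges_set failed_edges_set terminals
instance (nodes : List Int) (built_edges_set : List (Int × Int)) (failed_edges_set : List (Int × Int)) (terminals : List Int) (out : Bool) : Decidable (Spec_is_terminals_connected nodes built_edges_set failed_edges_set terminals out) := by unfold Spec_is_terminals_connected; infer_instance

-- ===== CLAIM (what is proved, stated in full; the proofs are below) =====
def Claim_equal_is_terminals_connected : Prop := ∀ (nodes : List Int) (built_edges_set : List (Int × Int)) (failed_edges_set : List (Int × Int)) (terminals : List Int), Dom_is_terminals_connected nodes built_edges_set failed_edges_set terminals → Pre_is_terminals_connected nodes built_edges_set failed_edges_set terminals → Spec_is_terminals_connected nodes built_edges_set failed_edges_set terminals (is_terminals_connected nodes built_edges_set failed_edges_set terminals)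

-- ===== LEMMAS AND PROOFS =====

-- the surviving edge list, the symmetric adjacency relation it induces, and reachability
def EdgesOf (built failed : List (Int × Int)) : List (Int × Int) :=
  built.filter (fun uv => !(failed.contains uv) && !(failed.contains (uv.2, uv.1)))

def NbRel (E : List (Int × Int)) (x y : Int) : Prop := (x, y) ∈ E ∨ (y, x) ∈ E

theorem reflTransGen_congr {α : Type} {R S : α → α → Prop} (h : ∀ a b, R a b ↔ S a b)
    {x y : α} : Relation.ReflTransGen R x y ↔ Relation.ReflTransGen S x y :=
  ⟨Relation.ReflTransGen.mono (fun a b hab => (h a b).1 hab),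
   Relation.ReflTransGen.mono (fun a b hab => (h a b).2 hab)⟩

-- ---- adjacency dict characterisation (A side) ----

theorem pvAdjStep_mem (d : PySem.Dict Int (List Int)) (uv : Int × Int) (x y : Int) :
    y ∈ (pvAdjStep d uv).getD x [] ↔
      y ∈ d.getD x [] ∨ (x = uv.1 ∧ y = uv.2) ∨ (x = uv.2 ∧ y = uv.1) := by
  simp only [pvAdjStep, PySem.Dict.getD_modify]
  split_ifs <;> simp_all

theorem pvAdjFold_mem (E : List (Int × Int)) : ∀ (d : PySem.Dict Int (List Int)) (x y : Int),
    y ∈ (E.foldl pvAdjStep d).getD x [] ↔ y ∈ d.getD x [] ∨ (x, y) ∈ E ∨ (y, x) ∈ E := by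
  induction E with
  | nil => intro d x y; simp
  | cons e E ih =>
    intro d x y
    simp only [List.foldl_cons, ih, pvAdjStep_mem, List.mem_cons, Prod.ext_iff]
    tauto

theorem pvAdjInit_getD (nodes : List Int) : ∀ (d : PySem.Dict Int (List Int)),
    (∀ x, d.getD x [] = []) →
    ∀ x, (nodes.foldl (fun d n => d.insert n ([] : List Int)) d).getD x [] = [] := by
  induction nodes with
  | nil => intro d h x; exact h x
  | cons n nodes ih =>
    intro d h x
    refine ih _ (fun z => ?_) x
    rw [PySem.Dict.getD_insert]
    split_ifs with hz
    · rfl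
    · exact h z

theorem pvAdjA_mem (nodes : List Int) (built failed : List (Int × Int)) (x y : Int) :
    y ∈ (built.foldl
      (fun d uv =>
        if failed.contains uv || failed.contains (uv.2, uv.1) then d else pvAdjStep d uv)
      (nodes.foldl (fun d n => d.insert n ([] : List Int)) PySem.Dict.empty)).getD x []
    ↔ NbRel (EdgesOf built failed) x y := by
  have hswap : built.foldl
      (fun d uv =>
        if failed.contains uv || failed.contains (uv.2, uv.1) then d else pvAdjStep d uv)
      (nodes.foldl (fun d n => d.insert n ([] : List Int)) PySem.Dict.empty)
      = (built.filter
          (fun uv => !(failed.contains uv || failed.contains (uv.2, uv.1)))).foldl pvAdjStep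
        (nodes.foldl (fun d n => d.insert n ([] : List Int)) PySem.Dict.empty) := by
    rw [← PySem.List.foldl_if_eq_foldl_filter]
    apply PySem.List.foldl_congr_mem
    intro acc uv _
    rcases hC : (failed.contains uv || failed.contains (uv.2, uv.1)) with _ | _ <;> simp
  have hE : built.filter (fun uv => !(failed.contains uv || failed.contains (uv.2, uv.1)))
      = EdgesOf built failed := by
    unfold EdgesOf
    apply List.filter_congr
    intro uv _
    simp [Bool.not_or]
  rw [hswap, hE, pvAdjFold_mem,
    pvAdjInit_getD nodes PySem.Dict.empty (fun z => PySem.Dict.getD_empty z []) x]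
  simp [NbRel]

-- ---- BFS characterisation (A side) ----

theorem pvBFS_mono (adj : PySem.Dict Int (List Int)) : ∀ (dq : List Int) (seen : PySem.Set Int),
    ∀ x ∈ seen, x ∈ pvBFS adj dq seen := by
  intro dq seen
  fun_induction pvBFS adj dq seen with
  | case1 seen => intro x hx; exact hx
  | case2 seen cur rest p ih =>
    intro x hx
    obtain ⟨new, hp, _, _, _, _⟩ := pvScan_spec seen (adj.getD cur [])
    exact ih x (by simp only [p, hp]; exact List.mem_append_left _ hx)

theorem pvBFS_sound (adj : PySem.Dict Int (List Int)) (P : Int → Prop)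
    (hP : ∀ x y, P x → y ∈ adj.getD x [] → P y) :
    ∀ (dq : List Int) (seen : PySem.Set Int),
      (∀ x ∈ dq, P x) → (∀ x ∈ seen, P x) → ∀ x ∈ pvBFS adj dq seen, P x := by
  intro dq seen
  fun_induction pvBFS adj dq seen with
  | case1 seen => intro _ hseen x hx; exact hseen x hx
  | case2 seen cur rest p ih =>
    intro hdq hseen
    obtain ⟨new, hp, h1, _, _, _⟩ := pvScan_spec seen (adj.getD cur [])
    have hnew : ∀ x ∈ new, P x := fun x hx =>
      hP cur x (hdq cur List.mem_cons_self) (h1 x hx)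
    refine ih ?_ ?_
    · simp only [p, hp]
      intro x hx
      rcases List.mem_append.1 hx with hx | hx
      · exact hdq x (List.mem_cons_of_mem _ hx)
      · exact hnew x hx
    · simp only [p, hp]
      intro x hx
      rcases List.mem_append.1 hx with hx | hx
      · exact hseen x hx
      · exact hnew x hx

theorem pvBFS_closed (adj : PySem.Dict Int (List Int)) :
    ∀ (dq : List Int) (seen : PySem.Set Int),
      (∀ x ∈ dq, x ∈ seen) →
      (∀ x ∈ seen, x ∉ dq → ∀ y ∈ adj.getD x [], y ∈ seen) →
      ∀ x ∈ pvBFS adj dq seen, ∀ y ∈ adj.getD x [], y ∈ pvBFS adj dq seen := by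
  intro dq seen
  fun_induction pvBFS adj dq seen with
  | case1 seen =>
    intro _ hcl x hx y hy
    exact hcl x hx (by simp) y hy
  | case2 seen cur rest p ih =>
    intro hdq hcl
    obtain ⟨new, hp, h1, h2, _, h5⟩ := pvScan_spec seen (adj.getD cur [])
    refine ih ?_ ?_
    · simp only [p, hp]
      intro x hx
      rcases List.mem_append.1 hx with hx | hx
      · exact List.mem_append_left _ (hdq x (List.mem_cons_of_mem _ hx))
      · exact List.mem_append_right _ hx
    · simp only [p, hp]
      intro x hx hxdq y hy
      rcases List.mem_append.1 hx with hx | hx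
      · by_cases hxc : x = cur
        · subst hxc
          rcases h5 y hy with hs | hn
          · exact List.mem_append_left _ hs
          · exact List.mem_append_right _ hn
        · have hxnd : x ∉ cur :: rest := by
            intro hmem
            rcases List.mem_cons.1 hmem with h | h
            · exact hxc h
            · exact hxdq (List.mem_append_left _ h)
          exact List.mem_append_left _ (hcl x hx hxnd y hy)
      · exact absurd (List.mem_append_right rest hx) hxdq

theorem pvBFS_reach (adj : PySem.Dict Int (List Int)) (start x : Int) :
    x ∈ pvBFS adj [start] (PySem.Set.ofList [start]) ↔
      Relation.ReflTransGen (fun a b => b ∈ adj.getD a []) start x := by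
  have hof : PySem.Set.ofList [start] = [start] := rfl
  rw [hof]
  constructor
  · intro hx
    refine pvBFS_sound adj (fun z => Relation.ReflTransGen (fun a b => b ∈ adj.getD a []) start z)
      (fun a b ha hb => Relation.ReflTransGen.tail ha hb) [start] [start] ?_ ?_ x hx
    · intro z hz; rcases List.mem_singleton.1 hz with rfl; exact Relation.ReflTransGen.refl
    · intro z hz; rcases List.mem_singleton.1 hz with rfl; exact Relation.ReflTransGen.refl
  · intro hx
    induction hx with
    | refl => exact pvBFS_mono adj [start] [start] start (List.mem_singleton.2 rfl)
    | tail _ hbc ih =>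
      exact pvBFS_closed adj [start] [start]
        (fun z hz => hz)
        (by intro z hz hznd; exact absurd hz hznd)
        _ ih _ hbc

-- ---- union-by-relabel characterisation (B side) ----

theorem pv_nbRel_symm (E : List (Int × Int)) (a b : Int) (h : NbRel E a b) : NbRel E b a := by
  unfold NbRel at h ⊢; tauto

theorem pv_rtg_symm (E : List (Int × Int)) {x y : Int}
    (h : Relation.ReflTransGen (NbRel E) x y) : Relation.ReflTransGen (NbRel E) y x := by
  induction h with
  | refl => exact Relation.ReflTransGen.refl
  | tail _ hbc ih => exact Relation.ReflTransGen.head (pv_nbRel_symm E _ _ hbc) ih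

theorem pv_rtg_nil {x y : Int} : Relation.ReflTransGen (NbRel []) x y ↔ x = y := by
  constructor
  · intro h
    induction h with
    | refl => rfl
    | tail _ hbc _ => simp [NbRel] at hbc
  · rintro rfl; exact Relation.ReflTransGen.refl

theorem pv_rtg_mem_nodes (nodes : List Int) (E : List (Int × Int))
    (hend : ∀ uv ∈ E, uv.1 ∈ nodes ∧ uv.2 ∈ nodes) {x y : Int} (hx : x ∈ nodes)
    (h : Relation.ReflTransGen (NbRel E) x y) : y ∈ nodes := by
  induction h with
  | refl => exact hx
  | tail _ hbc ih =>
    rcases hbc with hbc | hbc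
    · exact (hend _ hbc).2
    · exact (hend _ hbc).1

-- adding one (undirected) edge to the edge list joins exactly the two old classes
theorem pv_rtg_snoc (P : List (Int × Int)) (u v x y : Int) :
    Relation.ReflTransGen (NbRel (P ++ [(u, v)])) x y ↔
      Relation.ReflTransGen (NbRel P) x y
      ∨ (Relation.ReflTransGen (NbRel P) x u ∧ Relation.ReflTransGen (NbRel P) v y)
      ∨ (Relation.ReflTransGen (NbRel P) x v ∧ Relation.ReflTransGen (NbRel P) u y) := by
  constructor
  · intro h
    induction h with
    | refl => exact Or.inl Relation.ReflTransGen.refl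
    | tail _ hbc ih =>
      rename_i b c _
      have hsplit : NbRel P b c ∨ (b = u ∧ c = v) ∨ (b = v ∧ c = u) := by
        rcases hbc with hbc | hbc <;> rcases List.mem_append.1 hbc with hm | hm
        · exact Or.inl (Or.inl hm)
        · simp at hm; exact Or.inr (Or.inl ⟨hm.1, hm.2⟩)
        · exact Or.inl (Or.inr hm)
        · simp at hm; exact Or.inr (Or.inr ⟨hm.2, hm.1⟩)
      rcases hsplit with hbc' | ⟨rfl, rfl⟩ | ⟨rfl, rfl⟩
      · rcases ih with h1 | ⟨h1, h2⟩ | ⟨h1, h2⟩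
        · exact Or.inl (h1.tail hbc')
        · exact Or.inr (Or.inl ⟨h1, h2.tail hbc'⟩)
        · exact Or.inr (Or.inr ⟨h1, h2.tail hbc'⟩)
      · rcases ih with h1 | ⟨h1, h2⟩ | ⟨h1, h2⟩
        · exact Or.inr (Or.inl ⟨h1, Relation.ReflTransGen.refl⟩)
        · exact Or.inr (Or.inl ⟨h1, Relation.ReflTransGen.refl⟩)
        · exact Or.inl h1
      · rcases ih with h1 | ⟨h1, h2⟩ | ⟨h1, h2⟩
        · exact Or.inr (Or.inr ⟨h1, Relation.ReflTransGen.refl⟩)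
        · exact Or.inl h1
        · exact Or.inr (Or.inr ⟨h1, Relation.ReflTransGen.refl⟩)
  · have hmono : ∀ {a b : Int}, Relation.ReflTransGen (NbRel P) a b →
        Relation.ReflTransGen (NbRel (P ++ [(u, v)])) a b := by
      intro a b hab
      refine hab.mono ?_
      intro a' b' h'
      rcases h' with h' | h'
      · exact Or.inl (List.mem_append_left _ h')
      · exact Or.inr (List.mem_append_left _ h')
    have hedge : Relation.ReflTransGen (NbRel (P ++ [(u, v)])) u v :=
      Relation.ReflTransGen.single (Or.inl (List.mem_append_right _ (List.mem_singleton.2 rfl)))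
    have hedge' : Relation.ReflTransGen (NbRel (P ++ [(u, v)])) v u :=
      Relation.ReflTransGen.single (Or.inr (List.mem_append_right _ (List.mem_singleton.2 rfl)))
    rintro (h1 | ⟨h1, h2⟩ | ⟨h1, h2⟩)
    · exact hmono h1
    · exact ((hmono h1).trans hedge).trans (hmono h2)
    · exact ((hmono h1).trans hedge').trans (hmono h2)

-- the relabel loop rewrites exactly the keys whose value is cu
theorem pv_mergeFold_getD (cu cv : Int) :
    ∀ (ks : List Int) (d : PySem.Dict Int Int), ks.Nodup → ∀ z,
      (ks.foldl (fun d n => if d.getD n 0 == cu then d.insert n cv else d) d).getD z 0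
        = if z ∈ ks ∧ d.getD z 0 = cu then cv else d.getD z 0 := by
  intro ks
  induction ks with
  | nil => intro d _ z; simp
  | cons k ks ih =>
    intro d hnd z
    have hk : k ∉ ks := (List.nodup_cons.1 hnd).1
    simp only [List.foldl_cons]
    rw [ih _ (List.nodup_cons.1 hnd).2 z]
    by_cases hz : z = k
    · subst hz
      rcases hdk : (d.getD z 0 == cu) with _ | _
      · simp only [Bool.false_eq_true, if_false]
        have : ¬ d.getD z 0 = cu := by simpa using hdk
        simp [hk, this]
      · have hzc : d.getD z 0 = cu := by simpa using hdk
        simp only [if_true]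
        rw [if_neg (fun hc => hk hc.1)]
        rw [PySem.Dict.getD_insert, if_pos rfl]
        simp [hzc]
    · have hd1 : (if d.getD k 0 == cu then d.insert k cv else d).getD z 0 = d.getD z 0 := by
        split_ifs with h
        · rw [PySem.Dict.getD_insert, if_neg hz]
        · rfl
      rw [hd1]
      by_cases hzk : z ∈ ks <;> simp [hz, hzk]

theorem pv_mergeFold_keys :
    ∀ (ks : List Int) (d : PySem.Dict Int Int) (cu cv : Int),
      (∀ n ∈ ks, d.contains n = true) →
      (ks.foldl (fun d n => if d.getD n 0 == cu then d.insert n cv else d) d).keys = d.keys := by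
  intro ks
  induction ks with
  | nil => intro d cu cv _; rfl
  | cons k ks ih =>
    intro d cu cv hcon
    simp only [List.foldl_cons]
    have hk := hcon k List.mem_cons_self
    have h1 : (if d.getD k 0 == cu then d.insert k cv else d).keys = d.keys := by
      split_ifs with h
      · exact PySem.Dict.keys_insert_of_contains d cv hk
      · rfl
    rw [ih _ cu cv ?_, h1]
    intro n hn
    split_ifs with h
    · rw [PySem.Dict.contains_insert]
      simp [hcon n (List.mem_cons_of_mem _ hn)]
    · exact hcon n (List.mem_cons_of_mem _ hn)

theorem pvMerge_getD (comp : PySem.Dict Int Int) (cu cv : Int) (hnd : comp.keys.Nodup) (z : Int)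
    (hz : z ∈ comp.keys) :
    (pvMerge comp cu cv).getD z 0 = if comp.getD z 0 = cu then cv else comp.getD z 0 := by
  rw [pvMerge, pv_mergeFold_getD cu cv comp.keys comp hnd z]
  simp [hz]

theorem pvMerge_keys (comp : PySem.Dict Int Int) (cu cv : Int) :
    (pvMerge comp cu cv).keys = comp.keys := by
  rw [pvMerge]
  apply pv_mergeFold_keys
  intro n hn
  exact (PySem.Dict.contains_iff_mem_keys comp n).2 hn

-- the initial dict {n: n for n in nodes}
theorem pvComp0_getD (nodes : List Int) : ∀ (d : PySem.Dict Int Int) (z : Int),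
    (nodes.foldl (fun d n => d.insert n n) d).getD z 0
      = if z ∈ nodes then z else d.getD z 0 := by
  induction nodes with
  | nil => intro d z; simp
  | cons n nodes ih =>
    intro d z
    simp only [List.foldl_cons]
    rw [ih]
    by_cases hz : z ∈ nodes
    · simp [hz]
    · rw [PySem.Dict.getD_insert]
      by_cases hzn : z = n <;> simp [hz, hzn]

-- the invariant carried along the edge fold: labels are equal iff connected so far
theorem pv_union_inv (nodes : List Int) :
    ∀ (E P : List (Int × Int)) (comp : PySem.Dict Int Int),
      (∀ uv ∈ E, uv.1 ∈ nodes ∧ uv.2 ∈ nodes) →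
      comp.keys = PySem.Set.ofList nodes →
      comp.keys.Nodup →
      (∀ x y, x ∈ nodes → y ∈ nodes →
        (comp.getD x 0 = comp.getD y 0 ↔ Relation.ReflTransGen (NbRel P) x y)) →
      (E.foldl (fun comp uv =>
          let cu := comp.getD uv.1 0
          let cv := comp.getD uv.2 0
          if cu ≠ cv then pvMerge comp cu cv else comp) comp).keys = PySem.Set.ofList nodes
      ∧ ∀ x y, x ∈ nodes → y ∈ nodes →
          ((E.foldl (fun comp uv =>
              let cu := comp.getD uv.1 0
              let cv := comp.getD uv.2 0
              if cu ≠ cv then pvMerge comp cu cv else comp) comp).getD x 0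
            = (E.foldl (fun comp uv =>
              let cu := comp.getD uv.1 0
              let cv := comp.getD uv.2 0
              if cu ≠ cv then pvMerge comp cu cv else comp) comp).getD y 0
          ↔ Relation.ReflTransGen (NbRel (P ++ E)) x y) := by
  intro E
  induction E with
  | nil =>
    intro P comp _ hkeys _ hinv
    exact ⟨hkeys, by simpa using hinv⟩
  | cons e E ih =>
    intro P comp hend hkeys hnd hinv
    have he1 : e.1 ∈ nodes := (hend e List.mem_cons_self).1
    have he2 : e.2 ∈ nodes := (hend e List.mem_cons_self).2
    have hmemk : ∀ z, z ∈ nodes → z ∈ comp.keys := by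
      intro z hz; rw [hkeys]; exact (PySem.Set.mem_ofList nodes z).2 hz
    set cu := comp.getD e.1 0 with hcu
    set cv := comp.getD e.2 0 with hcv
    set comp' := if cu ≠ cv then pvMerge comp cu cv else comp with hcomp'
    have hkeys' : comp'.keys = PySem.Set.ofList nodes := by
      rw [hcomp']
      split_ifs
      · rw [pvMerge_keys]; exact hkeys
      · exact hkeys
    have hnd' : comp'.keys.Nodup := by rw [hkeys']; exact PySem.Set.nodup_ofList nodes
    have hinv' : ∀ x y, x ∈ nodes → y ∈ nodes →
        (comp'.getD x 0 = comp'.getD y 0 ↔ Relation.ReflTransGen (NbRel (P ++ [e])) x y) := by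
      intro x y hx hy
      rw [pv_rtg_snoc P e.1 e.2 x y]
      by_cases hne' : cu ≠ cv
      · have hget : ∀ z, z ∈ nodes →
            comp'.getD z 0 = if comp.getD z 0 = cu then cv else comp.getD z 0 := by
          intro z hz
          rw [hcomp', if_pos hne']
          exact pvMerge_getD comp cu cv hnd z (hmemk z hz)
        rw [hget x hx, hget y hy]
        have hxu : comp.getD x 0 = cu ↔ Relation.ReflTransGen (NbRel P) x e.1 := hinv x e.1 hx he1
        have hyu : comp.getD y 0 = cu ↔ Relation.ReflTransGen (NbRel P) e.1 y :=
          Iff.trans ⟨Eq.symm, Eq.symm⟩ (hinv e.1 y he1 hy)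
        have hxv : comp.getD x 0 = cv ↔ Relation.ReflTransGen (NbRel P) x e.2 := hinv x e.2 hx he2
        have hyv : comp.getD y 0 = cv ↔ Relation.ReflTransGen (NbRel P) e.2 y :=
          Iff.trans ⟨Eq.symm, Eq.symm⟩ (hinv e.2 y he2 hy)
        have hxy : comp.getD x 0 = comp.getD y 0 ↔ Relation.ReflTransGen (NbRel P) x y :=
          hinv x y hx hy
        by_cases h1 : comp.getD x 0 = cu <;> by_cases h2 : comp.getD y 0 = cu
        · rw [if_pos h1, if_pos h2]
          exact iff_of_true rfl (Or.inl ((hxu.1 h1).trans (hyu.1 h2)))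
        · rw [if_pos h1, if_neg h2]
          constructor
          · intro hcvy
            exact Or.inr (Or.inl ⟨hxu.1 h1, hyv.1 hcvy.symm⟩)
          · rintro (hc | ⟨_, hc2⟩ | ⟨hc1, _⟩)
            · exact absurd ((hxy.2 hc).symm.trans h1) h2
            · exact (hyv.2 hc2).symm
            · exact absurd (h1.symm.trans (hxv.2 hc1)) hne'
        · rw [if_neg h1, if_pos h2]
          constructor
          · intro hxcv
            exact Or.inr (Or.inr ⟨hxv.1 hxcv, hyu.1 h2⟩)
          · rintro (hc | ⟨hc1, _⟩ | ⟨hc1, _⟩)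
            · exact absurd ((hxy.2 hc).trans h2) h1
            · exact absurd (hxu.2 hc1) h1
            · exact hxv.2 hc1
        · rw [if_neg h1, if_neg h2]
          rw [hxy]
          constructor
          · exact Or.inl
          · rintro (hc | ⟨hc1, _⟩ | ⟨_, hc2⟩)
            · exact hc
            · exact absurd (hxu.2 hc1) h1
            · exact absurd (hyu.2 hc2) h2
      · -- cu = cv: the edge endpoints are already connected, nothing changes
        have hcomp'' : comp' = comp := by rw [hcomp', if_neg hne']
        have huv : Relation.ReflTransGen (NbRel P) e.1 e.2 := by
          rw [← hinv e.1 e.2 he1 he2]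
          exact not_not.1 hne'
        rw [hcomp'', hinv x y hx hy]
        constructor
        · exact Or.inl
        · rintro (hc | ⟨hc1, hc2⟩ | ⟨hc1, hc2⟩)
          · exact hc
          · exact (hc1.trans huv).trans hc2
          · exact (hc1.trans (pv_rtg_symm P huv)).trans hc2
    have hfold : (e :: E).foldl (fun comp uv =>
        let cu := comp.getD uv.1 0
        let cv := comp.getD uv.2 0
        if cu ≠ cv then pvMerge comp cu cv else comp) comp
        = E.foldl (fun comp uv =>
        let cu := comp.getD uv.1 0
        let cv := comp.getD uv.2 0
        if cu ≠ cv then pvMerge comp cu cv else comp) comp' := by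
      simp only [List.foldl_cons, hcomp', hcu, hcv]
    rw [hfold]
    have := ih (P ++ [e]) comp' (fun uv huv => hend uv (List.mem_cons_of_mem _ huv))
      hkeys' hnd' hinv'
    refine ⟨this.1, fun x y hx hy => ?_⟩
    rw [(this.2 x y hx hy)]
    have : P ++ e :: E = (P ++ [e]) ++ E := by simp
    rw [this]

-- ===== VERDICT (by name: the statement is the Claim_ definition above) =====
theorem is_terminals_connected_spec : Claim_equal_is_terminals_connected := by
  intro nodes built failed terminals _ hpre
  obtain ⟨hne, hhead, hedges⟩ := hpre
  rcases terminals with _ | ⟨t0, ts⟩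
  · exact absurd rfl hne
  unfold Spec_is_terminals_connected
  simp only [is_terminals_connected, is_terminals_connected_alt]
  have ht0 : t0 ∈ nodes := by simpa using hhead
  set E := EdgesOf built failed with hEdef
  have hend : ∀ uv ∈ E, uv.1 ∈ nodes ∧ uv.2 ∈ nodes := by
    intro uv huv
    rw [hEdef, EdgesOf, List.mem_filter] at huv
    refine hedges uv huv.1 ?_
    have := huv.2
    simp only [Bool.and_eq_true, Bool.not_eq_true'] at this
    constructor <;> simp_all
  -- the union fold with the inline skip equals the fold of the filtered edge list
  have hswapB : built.foldl
      (fun comp uv =>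
        if failed.contains uv || failed.contains (uv.2, uv.1) then comp
        else
          let cu := comp.getD uv.1 0
          let cv := comp.getD uv.2 0
          if cu ≠ cv then pvMerge comp cu cv else comp)
      (nodes.foldl (fun d n => d.insert n n) PySem.Dict.empty)
      = E.foldl
        (fun comp uv =>
          let cu := comp.getD uv.1 0
          let cv := comp.getD uv.2 0
          if cu ≠ cv then pvMerge comp cu cv else comp)
        (nodes.foldl (fun d n => d.insert n n) PySem.Dict.empty) := by
    have hfil : built.filter (fun uv => !(failed.contains uv || failed.contains (uv.2, uv.1)))
        = E := by
      rw [hEdef]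
      unfold EdgesOf
      apply List.filter_congr
      intro uv _
      simp [Bool.not_or]
    rw [← hfil, ← PySem.List.foldl_if_eq_foldl_filter]
    apply PySem.List.foldl_congr_mem
    intro acc uv _
    rcases hC : (failed.contains uv || failed.contains (uv.2, uv.1)) with _ | _ <;> simp
  rw [hswapB]
  -- invariant at the end of the fold
  have hcomp0keys : (nodes.foldl (fun d n => d.insert n n) PySem.Dict.empty).keys
      = PySem.Set.ofList nodes := by
    rw [PySem.Dict.keys_foldl_insert]
    exact PySem.Set.update_empty nodes
  have hcomp0nd : (nodes.foldl (fun d n => d.insert n n) PySem.Dict.empty).keys.Nodup := by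
    rw [hcomp0keys]; exact PySem.Set.nodup_ofList nodes
  have hinv0 : ∀ x y, x ∈ nodes → y ∈ nodes →
      ((nodes.foldl (fun d n => d.insert n n) PySem.Dict.empty).getD x 0
        = (nodes.foldl (fun d n => d.insert n n) PySem.Dict.empty).getD y 0
      ↔ Relation.ReflTransGen (NbRel ([] : List (Int × Int))) x y) := by
    intro x y hx hy
    rw [pvComp0_getD nodes PySem.Dict.empty x, pvComp0_getD nodes PySem.Dict.empty y,
      if_pos hx, if_pos hy, pv_rtg_nil]
  have hmain := pv_union_inv nodes E [] (nodes.foldl (fun d n => d.insert n n) PySem.Dict.empty)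
    hend hcomp0keys hcomp0nd hinv0
  set compF := E.foldl
    (fun comp uv =>
      let cu := comp.getD uv.1 0
      let cv := comp.getD uv.2 0
      if cu ≠ cv then pvMerge comp cu cv else comp)
    (nodes.foldl (fun d n => d.insert n n) PySem.Dict.empty) with hcompF
  have hkeysF : compF.keys = PySem.Set.ofList nodes := hmain.1
  have hinvF : ∀ x y, x ∈ nodes → y ∈ nodes →
      (compF.getD x 0 = compF.getD y 0 ↔ Relation.ReflTransGen (NbRel E) x y) := by
    intro x y hx hy
    have := hmain.2 x y hx hy
    simpa using this
  set adjA := built.foldl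
    (fun d uv =>
      if failed.contains uv || failed.contains (uv.2, uv.1) then d else pvAdjStep d uv)
    (nodes.foldl (fun d n => d.insert n ([] : List Int)) PySem.Dict.empty) with hadjA
  apply List.all_congr rfl
  intro t
  have hA : PySem.Set.contains (pvBFS adjA [t0] (PySem.Set.ofList [t0])) t = true ↔
      Relation.ReflTransGen (NbRel E) t0 t := by
    rw [PySem.Set.contains_iff, pvBFS_reach]
    exact reflTransGen_congr (fun a b => by rw [hadjA]; exact pvAdjA_mem nodes built failed a b)
  have hB : (compF.contains t && (compF.getD t 0 == compF.getD t0 0)) = true ↔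
      Relation.ReflTransGen (NbRel E) t0 t := by
    rw [Bool.and_eq_true, beq_iff_eq, PySem.Dict.contains_iff_mem_keys, hkeysF,
      PySem.Set.mem_ofList]
    constructor
    · rintro ⟨htn, heq⟩
      exact pv_rtg_symm E ((hinvF t t0 htn ht0).1 heq)
    · intro h
      have htn : t ∈ nodes := pv_rtg_mem_nodes nodes E hend ht0 h
      exact ⟨htn, (hinvF t t0 htn ht0).2 (pv_rtg_symm E h)⟩
  rcases hb : (compF.contains t && (compF.getD t 0 == compF.getD t0 0)) with _ | _
  · rcases ha : PySem.Set.contains (pvBFS adjA [t0] (PySem.Set.ofList [t0])) t with _ | _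
    · rfl
    · have hc := hB.2 (hA.1 ha)
      rw [hc] at hb
      cases hb
  · exact hA.2 (hB.1 hb)
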